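-- pv_equiv track=rewrite | github.com/NatJWalker-Hale/alignment_and_tree_tools | src/get_ident_seqs.py | get_ident_seqs
-- ===== SOURCE A (Python) =====
-- def get_ident_seqs(seq_dict: dict) -> dict[list]:
--     ident_dict = {}
--     for i, j in seq_dict.items():
--         if True in [i in v for v in ident_dict.values()]:
--             continue
--         for x, y in seq_dict.items():
--             if (j.upper() == y.upper()) & (i != x):
--                 try:
--                     ident_dict[i].append(x)
--                 except KeyError:
--                     ident_dict[i] = [x]
--     ident_list = []
--     for k, v in ident_dict.items():
--         ident_list.append([k] + v)
--     return ident_list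
-- ===== SOURCE B (Python) =====
-- def get_ident_seqs(seq_dict: dict) -> dict[list]:
--     groups = {}
--     for k, v in seq_dict.items():
--         groups.setdefault(v.upper(), []).append(k)
--     return [g for g in groups.values() if len(g) >= 2]
-- ===== Notes on version B (the rewrite author's own statement) =====
-- stated objective: faster
-- what changed: A rescans the whole dict for every key (plus a membership scan over all accumulated groups per key); B builds a dict from uppercased value to its list of keys in one pass and emits the groups of size >= 2.
import Mathlib
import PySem

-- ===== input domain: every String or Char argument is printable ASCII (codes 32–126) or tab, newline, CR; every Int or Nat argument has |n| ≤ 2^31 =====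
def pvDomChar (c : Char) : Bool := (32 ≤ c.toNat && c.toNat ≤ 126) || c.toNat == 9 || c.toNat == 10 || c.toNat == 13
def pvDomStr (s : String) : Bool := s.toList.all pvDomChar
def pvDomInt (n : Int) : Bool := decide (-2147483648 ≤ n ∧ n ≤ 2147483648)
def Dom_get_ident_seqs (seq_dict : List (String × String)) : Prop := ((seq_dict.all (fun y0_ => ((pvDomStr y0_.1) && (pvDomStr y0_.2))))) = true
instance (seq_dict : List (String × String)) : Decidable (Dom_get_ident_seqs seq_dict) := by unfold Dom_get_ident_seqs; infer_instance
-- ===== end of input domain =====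

-- B replaces A's quadratic rescans with one grouping pass keyed by the uppercased value (objective: faster).
-- The dict argument is decoded as PySem.Dict.ofList seq_dict in both ports (Python dict construction semantics).

-- ===== PORT A =====
-- inner 'for x, y in seq_dict.items(): …' loop of A
def pvInnerA (items : List (String × String)) (p : String × String)
    (d : PySem.Dict String (List String)) : PySem.Dict String (List String) :=
  items.foldl (fun d2 q =>
    if (PySem.Str.upper p.2 == PySem.Str.upper q.2) && (p.1 != q.1) then
      -- try: ident_dict[i].append(x)  except KeyError: ident_dict[i] = [x]
      d2.modify p.1 [] (fun l => l ++ [q.1])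
    else d2) d

-- one iteration of A's outer loop
def pvStepA (items : List (String × String))
    (d : PySem.Dict String (List String)) (p : String × String) : PySem.Dict String (List String) :=
  if (d.values.map (fun v => decide (p.1 ∈ v))).contains true then d
  else pvInnerA items p d

def get_ident_seqs (seq_dict : List (String × String)) : List (List String) :=
  let items := (PySem.Dict.ofList seq_dict).items
  let ident_dict := items.foldl (pvStepA items) PySem.Dict.empty
  ident_dict.items.foldl (fun acc kv => acc ++ [[kv.1] ++ kv.2]) []

-- ===== PORT B =====
def get_ident_seqs_alt (seq_dict : List (String × String)) : List (List String) :=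
  let items := (PySem.Dict.ofList seq_dict).items
  let groups := items.foldl (fun d p => d.modify (PySem.Str.upper p.2) [] (fun l => l ++ [p.1])) PySem.Dict.empty
  groups.values.filter (fun g => decide (2 ≤ g.length))

-- ===== PRECONDITION & SPEC =====
def Spec_get_ident_seqs (seq_dict : List (String × String)) (out : List (List String)) : Prop := out = get_ident_seqs_alt seq_dict
instance (seq_dict : List (String × String)) (out : List (List String)) : Decidable (Spec_get_ident_seqs seq_dict out) := by unfold Spec_get_ident_seqs; infer_instance

-- ===== CLAIM (what is proved, stated in full; the proofs are below) =====
def Claim_equal_get_ident_seqs : Prop := ∀ (seq_dict : List (String × String)), Dom_get_ident_seqs seq_dict → Spec_get_ident_seqs seq_dict (get_ident_seqs seq_dict)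

-- ===== LEMMAS AND PROOFS =====

-- uppercased value of an item
def pvUpk (p : String × String) : String := PySem.Str.upper p.2

-- keys of L whose value uppercases to u, in order
def pvGrp (L : List (String × String)) (u : String) : List String :=
  (L.filter (fun p => pvUpk p == u)).map (fun p => p.1)

-- A's ident_dict after processing prefix P of L, as an items list
def pvIdent (L P : List (String × String)) : List (String × List String) :=
  ((PySem.Set.ofList (P.map pvUpk)).filter (fun u => decide (2 ≤ (pvGrp L u).length))).map
    (fun u => ((pvGrp L u).headI, (pvGrp L u).tail))

lemma pvMem_grp {L : List (String × String)} {u : String} {a : String} :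
    a ∈ pvGrp L u ↔ ∃ p ∈ L, p.1 = a ∧ pvUpk p = u := by
  simp [pvGrp, List.mem_filter]

lemma pvMem_grp_self {L : List (String × String)} {p : String × String}
    (hnd : (L.map (fun p => p.1)).Nodup) (hp : p ∈ L) (u : String) :
    p.1 ∈ pvGrp L u ↔ u = pvUpk p := by
  constructor
  · intro h
    rcases pvMem_grp.mp h with ⟨q, hq, hq1, hqu⟩
    have : q = p := List.inj_on_of_nodup_map hnd hq hp hq1
    rw [← hqu, this]
  · intro h; subst h
    exact pvMem_grp.mpr ⟨p, hp, rfl, rfl⟩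

-- pvGrp distributes over append
lemma pvGrp_append (P S : List (String × String)) (u : String) :
    pvGrp (P ++ S) u = pvGrp P u ++ pvGrp S u := by
  simp [pvGrp, List.filter_append]

lemma pvGrp_nil_of_not_mem {P : List (String × String)} {u : String}
    (h : u ∉ P.map pvUpk) : pvGrp P u = [] := by
  rcases hx : pvGrp P u with _ | ⟨a, t⟩
  · rfl
  · exfalso
    have : a ∈ pvGrp P u := by rw [hx]; exact List.mem_cons_self
    rcases pvMem_grp.mp this with ⟨q, hq, _, hqu⟩
    exact h (hqu ▸ List.mem_map_of_mem hq)

lemma pvGrp_ne_nil_of_mem {P : List (String × String)} {u : String}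
    (h : u ∈ P.map pvUpk) : pvGrp P u ≠ [] := by
  rcases List.mem_map.mp h with ⟨q, hq, hqu⟩
  intro hnil
  have : q.1 ∈ pvGrp P u := pvMem_grp.mpr ⟨q, hq, rfl, hqu⟩
  simp [hnil] at this

lemma pvGrp_subset_fst {P : List (String × String)} {u : String} {a : String}
    (h : a ∈ pvGrp P u) : a ∈ P.map (fun p => p.1) := by
  rcases pvMem_grp.mp h with ⟨q, hq, hq1, _⟩
  exact hq1 ▸ List.mem_map_of_mem hq

lemma pvHeadI_mem {l : List String} (h : l ≠ []) : l.headI ∈ l := by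
  cases l with
  | nil => exact absurd rfl h
  | cons x t => exact List.mem_cons_self

lemma pvHeadI_append {a : List String} (b : List String) (h : a ≠ []) :
    (a ++ b).headI = a.headI := by
  cases a with
  | nil => exact absurd rfl h
  | cons x t => rfl

lemma pvHeadI_cons_tail {l : List String} (h : l ≠ []) : l.headI :: l.tail = l := by
  cases l with
  | nil => exact absurd rfl h
  | cons x t => rfl

-- the matches collected by A's inner loop for a FIRST occurrence p are exactly the later members of p's group
lemma pvMatches_first {P S' : List (String × String)} {p : String × String}
    (hnd : (((P ++ p :: S').map (fun p => p.1))).Nodup)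
    (hnin : pvUpk p ∉ P.map pvUpk) :
    ((P ++ p :: S').filter (fun q => (PySem.Str.upper p.2 == PySem.Str.upper q.2) && (p.1 != q.1))).map (fun q => q.1)
      = pvGrp S' (pvUpk p) := by
  have hP : (P.filter (fun q => (PySem.Str.upper p.2 == PySem.Str.upper q.2) && (p.1 != q.1))) = [] := by
    rw [List.filter_eq_nil_iff]
    intro q hq
    simp only [Bool.and_eq_true, beq_iff_eq, bne_iff_ne, not_and]
    intro hup _
    exact hnin (by
      have : pvUpk q = pvUpk p := hup.symm
      exact this ▸ List.mem_map_of_mem hq)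
  have hp1 : p.1 ∉ S'.map (fun p => p.1) := by
    simp only [List.map_append, List.map_cons] at hnd
    have := (List.nodup_append.mp hnd).2.1
    exact (List.nodup_cons.mp this).1
  have hS : (S'.filter (fun q => (PySem.Str.upper p.2 == PySem.Str.upper q.2) && (p.1 != q.1)))
      = S'.filter (fun q => pvUpk q == pvUpk p) := by
    apply List.filter_congr
    intro q hq
    have hne : p.1 ≠ q.1 := fun h => hp1 (h ▸ List.mem_map_of_mem hq)
    rw [Bool.eq_iff_iff]
    simp only [pvUpk, beq_iff_eq, Bool.and_eq_true, bne_iff_ne, ne_eq]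
    constructor
    · rintro ⟨h, _⟩; exact h.symm
    · intro h; exact ⟨h.symm, hne⟩
  simp only [List.filter_append, List.filter_cons, hP, hS]
  simp only [bne_self_eq_false, Bool.and_false, if_false, List.nil_append, cond_false]
  rfl

-- pvGrp L (pvUpk p) at a first occurrence: p.1 is the head, the later matches the tail
lemma pvGrp_first {P S' : List (String × String)} {p : String × String}
    (hnin : pvUpk p ∉ P.map pvUpk) :
    pvGrp (P ++ p :: S') (pvUpk p) = p.1 :: pvGrp S' (pvUpk p) := by
  rw [pvGrp_append, pvGrp_nil_of_not_mem hnin]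
  simp [pvGrp, List.filter_cons]

-- facts about the group of a SECOND occurrence p (its value class already met inside P)
lemma pvGrp_second {P S' : List (String × String)} {p : String × String}
    (hnd : (((P ++ p :: S').map (fun p => p.1))).Nodup)
    (hin : pvUpk p ∈ P.map pvUpk) :
    (pvGrp (P ++ p :: S') (pvUpk p)).headI ∈ P.map (fun p => p.1) ∧
    2 ≤ (pvGrp (P ++ p :: S') (pvUpk p)).length ∧
    p.1 ∈ (pvGrp (P ++ p :: S') (pvUpk p)).tail := by
  have hPne : pvGrp P (pvUpk p) ≠ [] := pvGrp_ne_nil_of_mem hin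
  have hsplit : pvGrp (P ++ p :: S') (pvUpk p)
      = pvGrp P (pvUpk p) ++ p.1 :: pvGrp S' (pvUpk p) := by
    rw [pvGrp_append]
    simp [pvGrp, List.filter_cons]
  have hp1 : p.1 ∉ P.map (fun p => p.1) := by
    simp only [List.map_append, List.map_cons] at hnd
    rcases List.nodup_append.mp hnd with ⟨_, _, hdisj⟩
    intro hmem
    exact hdisj p.1 hmem p.1 List.mem_cons_self rfl
  have hhead : (pvGrp (P ++ p :: S') (pvUpk p)).headI ∈ P.map (fun p => p.1) := by
    rw [hsplit, pvHeadI_append _ hPne]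
    exact pvGrp_subset_fst (pvHeadI_mem hPne)
  refine ⟨hhead, ?_, ?_⟩
  · rw [hsplit, List.length_append, List.length_cons]
    have : 1 ≤ (pvGrp P (pvUpk p)).length := List.length_pos_iff.mpr hPne
    omega
  · have hmem : p.1 ∈ pvGrp (P ++ p :: S') (pvUpk p) := by
      rw [hsplit]; exact List.mem_append_right _ List.mem_cons_self
    have hne : p.1 ≠ (pvGrp (P ++ p :: S') (pvUpk p)).headI := fun h => hp1 (h ▸ hhead)
    have := pvHeadI_cons_tail (l := pvGrp (P ++ p :: S') (pvUpk p)) (by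
      intro h; rw [h] at hmem; simp at hmem)
    rw [← this] at hmem
    rcases List.mem_cons.mp hmem with h | h
    · exact absurd h hne
    · exact h

-- every key of A's dict after prefix P is a key from P
lemma pvIdent_fst_mem {L P S : List (String × String)} (hL : L = P ++ S)
    {q : String × List String} (hq : q ∈ pvIdent L P) : q.1 ∈ P.map (fun p => p.1) := by
  rcases List.mem_map.mp hq with ⟨u, hu, hqe⟩
  have hu' : u ∈ PySem.Set.ofList (P.map pvUpk) := List.mem_of_mem_filter hu
  have humem : u ∈ P.map pvUpk := (PySem.Set.mem_ofList _ _).mp hu'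
  have hPne : pvGrp P u ≠ [] := pvGrp_ne_nil_of_mem humem
  have : (pvGrp L u).headI ∈ P.map (fun p => p.1) := by
    rw [hL, pvGrp_append, pvHeadI_append _ hPne]
    exact pvGrp_subset_fst (pvHeadI_mem hPne)
  rw [← hqe]
  exact this

-- A's skip condition is exactly: p's value class was already met inside P
lemma pvCond_iff {L P S' : List (String × String)} {p : String × String}
    (hnd : ((L.map (fun p => p.1))).Nodup) (hL : L = P ++ p :: S') :
    (((PySem.Dict.mk (pvIdent L P)).values.map (fun v => decide (p.1 ∈ v))).contains true)
      = decide (pvUpk p ∈ P.map pvUpk) := by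
  rw [Bool.eq_iff_iff]
  have hbase : (((PySem.Dict.mk (pvIdent L P)).values.map (fun v => decide (p.1 ∈ v))).contains true) = true
      ↔ ∃ q ∈ pvIdent L P, p.1 ∈ q.2 := by
    simp [PySem.Dict.values]
    try tauto
  rw [hbase, decide_eq_true_iff]
  have hpL : p ∈ L := by rw [hL]; exact List.mem_append_right _ List.mem_cons_self
  constructor
  · rintro ⟨q, hq, hmem⟩
    rcases List.mem_map.mp hq with ⟨u, hu, hqe⟩
    have htl : p.1 ∈ pvGrp L u := by
      rw [← hqe] at hmem
      exact List.mem_of_mem_tail hmem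
    have hu' : u = pvUpk p := (pvMem_grp_self hnd hpL u).mp htl
    have : u ∈ P.map pvUpk := (PySem.Set.mem_ofList _ _).mp (List.mem_of_mem_filter hu)
    exact hu' ▸ this
  · intro hin
    have h2 := pvGrp_second (p := p) (by rw [← hL]; exact hnd) hin
    rw [← hL] at h2
    refine ⟨((pvGrp L (pvUpk p)).headI, (pvGrp L (pvUpk p)).tail), ?_, h2.2.2⟩
    refine List.mem_map.mpr ⟨pvUpk p, ?_, rfl⟩
    refine List.mem_filter.mpr ⟨(PySem.Set.mem_ofList _ _).mpr hin, ?_⟩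
    exact decide_eq_true h2.2.1

-- appending to the value of the LAST entry of a dict
lemma pvFold_last (rest : List String) (base : List (String × List String)) (acc : List String)
    (i : String) (hb : ∀ q ∈ base, (q.1 == i) = false) :
    (rest.foldl (fun d2 x => d2.modify i [] (fun l => l ++ [x])) (PySem.Dict.mk (base ++ [(i, acc)]))).items
      = base ++ [(i, acc ++ rest)] := by
  induction rest generalizing acc with
  | nil => simp
  | cons x rest ih =>
    have hcon : (PySem.Dict.mk (base ++ [(i, acc)])).contains i = true := by
      simp [PySem.Dict.contains]
    have hfind : ((base ++ [(i, acc)]).find? (fun q => q.1 == i)) = some (i, acc) := by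
      rw [List.find?_append]
      have : base.find? (fun q => q.1 == i) = none := List.find?_eq_none.mpr (by
        intro q hq; simp [hb q hq])
      simp [this]
    have hstep : (PySem.Dict.mk (base ++ [(i, acc)])).modify i [] (fun l => l ++ [x])
        = PySem.Dict.mk (base ++ [(i, acc ++ [x])]) := by
      simp only [PySem.Dict.modify, PySem.Dict.getD, PySem.Dict.get?, PySem.Dict.items, hfind,
        Option.map_some, Option.getD_some, PySem.Dict.insert, hcon, if_true]
      congr 1
      rw [List.map_append]
      congr 1
      · exact (List.map_congr_left (fun q hq => by simp [hb q hq])).trans (List.map_id base)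
      · simp
    rw [List.foldl_cons, hstep, ih (acc ++ [x]) ]
    simp

-- A's inner loop on a key absent from the dict: appends one entry iff there is at least one match
lemma pvInner_items (L : List (String × String)) (p : String × String)
    (d : PySem.Dict String (List String)) (hni : d.contains p.1 = false) :
    (pvInnerA L p d).items = d.items ++
      (if ((L.filter (fun q => (PySem.Str.upper p.2 == PySem.Str.upper q.2) && (p.1 != q.1))).map (fun q => q.1)) = []
       then []
       else [(p.1, (L.filter (fun q => (PySem.Str.upper p.2 == PySem.Str.upper q.2) && (p.1 != q.1))).map (fun q => q.1))]) := by
  unfold pvInnerA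
  rw [PySem.List.foldl_if_eq_foldl_filter]
  have hm : List.foldl (fun d2 x => d2.modify p.1 [] fun l => l ++ [x]) d
        ((L.filter (fun q => (PySem.Str.upper p.2 == PySem.Str.upper q.2) && (p.1 != q.1))).map (fun q => q.1))
      = List.foldl (fun d2 q => d2.modify p.1 [] fun l => l ++ [q.1]) d
        (L.filter (fun q => (PySem.Str.upper p.2 == PySem.Str.upper q.2) && (p.1 != q.1))) := by
    rw [List.foldl_map]
  rw [← hm]
  generalize ((L.filter (fun q => (PySem.Str.upper p.2 == PySem.Str.upper q.2) && (p.1 != q.1))).map (fun q => q.1)) = ms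
  cases ms with
  | nil => simp
  | cons m rest =>
    have hb : ∀ q ∈ d.items, (q.1 == p.1) = false := by
      intro q hq
      have := List.any_eq_false.mp hni q hq
      simpa using this
    have hstep : d.modify p.1 [] (fun l => l ++ [m]) = PySem.Dict.mk (d.items ++ [(p.1, [m])]) := by
      simp only [PySem.Dict.modify, PySem.Dict.getD_of_not_contains d [] hni, List.nil_append,
        PySem.Dict.insert, hni, Bool.false_eq_true, if_false]
    rw [List.foldl_cons, hstep, pvFold_last rest d.items [m] p.1 hb]
    simp

lemma pvSet_snoc {xs : List String} (x : String) :
    PySem.Set.ofList (xs ++ [x]) = PySem.Set.add (PySem.Set.ofList xs) x := by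
  simp [PySem.Set.ofList, List.foldl_append]

lemma pvSet_add_mem {xs : List String} {x : String} (h : x ∈ xs) :
    PySem.Set.add (PySem.Set.ofList xs) x = PySem.Set.ofList xs := by
  simp [PySem.Set.add, PySem.Set.contains, h]

lemma pvSet_add_not_mem {xs : List String} {x : String} (h : x ∉ xs) :
    PySem.Set.add (PySem.Set.ofList xs) x = PySem.Set.ofList xs ++ [x] := by
  simp [PySem.Set.add, PySem.Set.contains, h]

-- one step of A's outer loop advances the prefix by one
lemma pvStep_eq {P S' : List (String × String)} {p : String × String}
    (hnd : (((P ++ p :: S').map (fun p => p.1))).Nodup) :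
    pvStepA (P ++ p :: S') (PySem.Dict.mk (pvIdent (P ++ p :: S') P)) p
      = PySem.Dict.mk (pvIdent (P ++ p :: S') (P ++ [p])) := by
  unfold pvStepA
  rw [pvCond_iff hnd rfl]
  by_cases hin : pvUpk p ∈ P.map pvUpk
  · rw [if_pos (by simpa using hin)]
    have : PySem.Set.ofList ((P ++ [p]).map pvUpk) = PySem.Set.ofList (P.map pvUpk) := by
      rw [List.map_append, List.map_singleton, pvSet_snoc, pvSet_add_mem hin]
    unfold pvIdent
    rw [this]
  · rw [if_neg (by simpa using hin)]
    have hp1 : p.1 ∉ P.map (fun p => p.1) := by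
      simp only [List.map_append, List.map_cons] at hnd
      rcases List.nodup_append.mp hnd with ⟨_, _, hdisj⟩
      intro hmem
      exact hdisj p.1 hmem p.1 List.mem_cons_self rfl
    have hni : (PySem.Dict.mk (pvIdent (P ++ p :: S') P)).contains p.1 = false := by
      simp only [PySem.Dict.contains]
      rw [List.any_eq_false]
      intro q hq
      have hqP := pvIdent_fst_mem rfl hq
      simp only [beq_iff_eq]
      intro h
      exact hp1 (h ▸ hqP)
    apply PySem.Dict.ext
    rw [pvInner_items _ _ _ hni, pvMatches_first hnd hin]
    show pvIdent (P ++ p :: S') P ++ _ = _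
    unfold pvIdent
    rw [List.map_append, List.map_singleton, pvSet_snoc, pvSet_add_not_mem hin,
      List.filter_append, List.map_append]
    congr 1
    have hfirst := pvGrp_first (S' := S') hin
    rcases hms : pvGrp S' (pvUpk p) with _ | ⟨m, rest⟩
    · rw [hms] at hfirst
      simp [hfirst]
    · rw [hms] at hfirst
      simp [hfirst]

-- the outer loop, from any prefix to the end
lemma pvFoldA {L : List (String × String)} (hnd : ((L.map (fun p => p.1))).Nodup) :
    ∀ (S P : List (String × String)), L = P ++ S →
      S.foldl (pvStepA L) (PySem.Dict.mk (pvIdent L P)) = PySem.Dict.mk (pvIdent L L) := by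
  intro S
  induction S with
  | nil =>
    intro P hL
    rw [List.foldl_nil, hL, List.append_nil]
  | cons p S' ih =>
    intro P hL
    rw [List.foldl_cons]
    subst hL
    rw [pvStep_eq hnd]
    exact ih (P ++ [p]) (by simp)

lemma pvIdent_nil (L : List (String × String)) : pvIdent L [] = [] := by
  simp [pvIdent, PySem.Set.ofList, PySem.Set.empty]

-- characterization of port A's result
lemma pvA_char (seq_dict : List (String × String)) :
    get_ident_seqs seq_dict
      = (pvIdent (PySem.Dict.ofList seq_dict).items (PySem.Dict.ofList seq_dict).items).map
          (fun kv => [kv.1] ++ kv.2) := by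
  have hnd : (((PySem.Dict.ofList seq_dict).items.map (fun p => p.1))).Nodup :=
    PySem.Dict.nodup_keys_ofList seq_dict
  have h0 : (PySem.Dict.empty : PySem.Dict String (List String))
      = PySem.Dict.mk (pvIdent (PySem.Dict.ofList seq_dict).items []) := by
    rw [pvIdent_nil]; rfl
  show (List.foldl (fun acc kv => acc ++ [[kv.1] ++ kv.2]) []
      ((List.foldl (pvStepA (PySem.Dict.ofList seq_dict).items) PySem.Dict.empty
        (PySem.Dict.ofList seq_dict).items)).items) = _
  rw [h0, pvFoldA hnd _ [] rfl, PySem.List.foldl_append_singleton_eq_map, List.nil_append]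

-- characterization of port B's result
lemma pvB_char (seq_dict : List (String × String)) :
    get_ident_seqs_alt seq_dict
      = ((PySem.Set.ofList ((PySem.Dict.ofList seq_dict).items.map pvUpk)).filter
          (fun u => decide (2 ≤ (pvGrp (PySem.Dict.ofList seq_dict).items u).length))).map
          (fun u => pvGrp (PySem.Dict.ofList seq_dict).items u) := by
  set L := (PySem.Dict.ofList seq_dict).items with hLdef
  show ((L.foldl (fun d p => d.modify (PySem.Str.upper p.2) [] (fun l => l ++ [p.1])) PySem.Dict.empty).values.filter
      (fun g => decide (2 ≤ g.length))) = _
  set G := L.foldl (fun d p => d.modify (PySem.Str.upper p.2) [] (fun l => l ++ [p.1])) PySem.Dict.empty with hG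
  have hkeys : G.keys = PySem.Set.ofList (L.map pvUpk) := by
    rw [hG]
    rw [show (fun (d : PySem.Dict String (List String)) (p : String × String) =>
        d.modify (PySem.Str.upper p.2) [] (fun l => l ++ [p.1]))
      = (fun d p => d.modify (pvUpk p) [] ((fun _ p l => l ++ [p.1]) d p)) from rfl]
    rw [PySem.Dict.keys_foldl_modify_key L pvUpk [] _ PySem.Dict.empty]
    rfl
  have hknd : G.keys.Nodup := by
    rw [hG]
    rw [show (fun (d : PySem.Dict String (List String)) (p : String × String) =>
        d.modify (PySem.Str.upper p.2) [] (fun l => l ++ [p.1]))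
      = (fun d p => d.modify (pvUpk p) [] ((fun _ p l => l ++ [p.1]) d p)) from rfl]
    exact PySem.Dict.nodup_keys_foldl_modify_key L pvUpk [] _ PySem.Dict.empty (by simp [PySem.Dict.keys, PySem.Dict.empty])
  have hgetD : ∀ u, G.getD u [] = pvGrp L u := by
    intro u
    rw [hG]
    have hm : ((L.map (fun p => (pvUpk p, p.1))).foldl (fun d q => d.modify q.1 [] (fun l => l ++ [q.2])) PySem.Dict.empty)
        = (L.foldl (fun d p => d.modify (PySem.Str.upper p.2) [] (fun l => l ++ [p.1])) PySem.Dict.empty) := by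
      rw [List.foldl_map]
      rfl
    rw [← hm]
    rw [PySem.Dict.getD_foldl_modify_append]
    rw [show (PySem.Dict.empty : PySem.Dict String (List String)).getD u [] = [] from rfl]
    rw [List.nil_append]
    rw [show ((L.map (fun p => (pvUpk p, p.1))).filter (fun q => q.1 == u))
        = ((L.filter (fun p => pvUpk p == u)).map (fun p => (pvUpk p, p.1))) from by
      rw [List.filter_map]; rfl]
    rw [List.map_map]
    rfl
  rw [PySem.Dict.values_eq_map_keys G hknd [], hkeys, List.filter_map]
  rw [show ((PySem.Set.ofList (L.map pvUpk)).filter ((fun g : List String => decide (2 ≤ g.length)) ∘ fun k => G.getD k []))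
      = ((PySem.Set.ofList (L.map pvUpk)).filter (fun u => decide (2 ≤ (pvGrp L u).length))) from
    List.filter_congr (fun u _ => by simp [Function.comp, hgetD u])]
  exact List.map_congr_left (fun u _ => hgetD u)




-- ===== VERDICT (by name: the statement is the Claim_ definition above) =====
theorem get_ident_seqs_spec : Claim_equal_get_ident_seqs := by
  intro seq_dict _
  unfold Spec_get_ident_seqs
  rw [pvA_char, pvB_char]
  unfold pvIdent
  rw [List.map_map]
  apply List.map_congr_left
  intro u hu
  have humem : u ∈ (PySem.Dict.ofList seq_dict).items.map pvUpk :=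
    (PySem.Set.mem_ofList _ _).mp (List.mem_of_mem_filter hu)
  have hne : pvGrp (PySem.Dict.ofList seq_dict).items u ≠ [] := by
    rcases List.mem_map.mp humem with ⟨q, hq, hqu⟩
    intro hnil
    have : q.1 ∈ pvGrp (PySem.Dict.ofList seq_dict).items u := pvMem_grp.mpr ⟨q, hq, rfl, hqu⟩
    simp [hnil] at this
  show [_] ++ _ = _
  rw [List.singleton_append]
  exact pvHeadI_cons_tail hne
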